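-- pv_equiv track=rewrite | github.com/AlexShashkov/PolynomDeg3SolverPython | fastpowtest.py | fastbinpow
-- ===== SOURCE A (Python) =====
-- def fastbinpow(base):
--     """
--     Fast Power Algorithm - Exponentiation by Squaring
--     https://www.rookieslab.com/posts/fast-power-algorithm-exponentiation-by-squaring-cpp-python-implementation
--     """
--     power = 10
--     result = 1
--     while power > 0:
--         if power % 2 == 0:
--             power = power // 2
--             base = base * base
--         else:
--             power = power - 1
--             result = result * base
--
--             power = power // 2
--             base = base * base
--
--     return result
-- ===== SOURCE B (Python) =====
-- def fastbinpow(base):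
--     """Tenth power by a plain accumulator loop (simpler: no squaring/bit bookkeeping)."""
--     result = 1
--     for _ in range(10):
--         result = result * base
--     return result
-- ===== Notes on version B (the rewrite author's own statement) =====
-- stated objective: simpler
-- what changed: Replaced the exponentiation-by-squaring while-loop (halving exponent, odd-bit bookkeeping) with a plain accumulator loop multiplying by base ten times.
import Mathlib
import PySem

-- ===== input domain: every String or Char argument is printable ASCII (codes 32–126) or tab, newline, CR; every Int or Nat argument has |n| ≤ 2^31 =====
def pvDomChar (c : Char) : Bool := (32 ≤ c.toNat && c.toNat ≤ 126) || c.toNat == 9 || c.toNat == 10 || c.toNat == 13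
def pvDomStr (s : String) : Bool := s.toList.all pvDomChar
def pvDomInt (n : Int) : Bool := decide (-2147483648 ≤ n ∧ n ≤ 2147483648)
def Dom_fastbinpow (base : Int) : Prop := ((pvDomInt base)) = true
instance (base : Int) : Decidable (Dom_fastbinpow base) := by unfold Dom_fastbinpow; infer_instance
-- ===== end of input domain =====

-- B replaces exponentiation-by-squaring with a plain ten-multiplication accumulator loop (simpler).
-- ===== PORT A =====
-- transliteration of A's while-loop: state (power, base, result), recursing on power.toNat
def fastbinpowLoop (power base result : Int) : Int :=
  if h : power > 0 then
    if PySem.Int.mod power 2 = 0 then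
      fastbinpowLoop (PySem.Int.floordiv power 2) (base * base) result
    else
      fastbinpowLoop (PySem.Int.floordiv (power - 1) 2) (base * base) (result * base)
  else
    result
termination_by power.toNat
decreasing_by
  · rw [PySem.Int.floordiv_eq_ediv_of_pos (by omega)]; omega
  · rw [PySem.Int.floordiv_eq_ediv_of_pos (by omega)]; omega

def fastbinpow (base : Int) : Int := fastbinpowLoop 10 base 1

-- ===== PORT B =====
def fastbinpow_alt (base : Int) : Int :=
  (List.range 10).foldl (fun result _ => result * base) 1

-- ===== PRECONDITION & SPEC =====
def Spec_fastbinpow (base : Int) (out : Int) : Prop := out = fastbinpow_alt base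
instance (base : Int) (out : Int) : Decidable (Spec_fastbinpow base out) := by unfold Spec_fastbinpow; infer_instance

-- ===== CLAIM (what is proved, stated in full; the proofs are below) =====
def Claim_equal_fastbinpow : Prop := ∀ (base : Int), Dom_fastbinpow base → Spec_fastbinpow base (fastbinpow base)

-- ===== LEMMAS AND PROOFS =====

-- ===== VERDICT (by name: the statement is the Claim_ definition above) =====
lemma loop0 (b r : Int) : fastbinpowLoop 0 b r = r := by
  rw [fastbinpowLoop]; norm_num

lemma loop1 (b r : Int) : fastbinpowLoop 1 b r = r * b := by
  rw [fastbinpowLoop]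
  norm_num [PySem.Int.mod, PySem.Int.floordiv, show Int.fmod (1:Int) 2 = 1 by decide,
    show Int.fdiv (0:Int) 2 = 0 by decide, loop0]

lemma loop2 (b r : Int) : fastbinpowLoop 2 b r = r * (b * b) := by
  rw [fastbinpowLoop]
  norm_num [PySem.Int.mod, PySem.Int.floordiv, show Int.fmod (2:Int) 2 = 0 by decide,
    show Int.fdiv (2:Int) 2 = 1 by decide, loop1]

lemma loop5 (b r : Int) : fastbinpowLoop 5 b r = r * b * ((b * b) * (b * b)) := by
  rw [fastbinpowLoop]
  norm_num [PySem.Int.mod, PySem.Int.floordiv, show Int.fmod (5:Int) 2 = 1 by decide,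
    show Int.fdiv (4:Int) 2 = 2 by decide, loop2]

lemma loop10 (b r : Int) : fastbinpowLoop 10 b r = r * (b*b) * ((b*b)*(b*b) * ((b*b)*(b*b))) := by
  rw [fastbinpowLoop]
  norm_num [PySem.Int.mod, PySem.Int.floordiv, show Int.fmod (10:Int) 2 = 0 by decide,
    show Int.fdiv (10:Int) 2 = 5 by decide, loop5]
theorem fastbinpow_spec : Claim_equal_fastbinpow := by
  intro base _
  show fastbinpowLoop 10 base 1 = _
  rw [loop10]
  simp [fastbinpow_alt, List.range_succ]
  ring
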